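-- pv_equiv track=rewrite | github.com/JohnComonitski/SoccerAPI | soccerapi/lib/utils.py | get_median_idx
-- ===== SOURCE A (Python) =====
-- def get_median_idx(x, y):
--     products = [a * b for a, b in zip(x, y)]
--     sorted_values = sorted(products)
--
--     n = len(products)
--     if n % 2 == 1:
--         median = sorted_values[n // 2]
--     else:
--         median = sorted_values[(n // 2) - 1]
--
--     return products.index(median)
-- ===== SOURCE B (Python) =====
-- def get_median_idx(x, y):
--     products = [a * b for a, b in zip(x, y)]
--     k = (len(products) - 1) // 2
--
--     def select(lst, k):
--         # quickselect: k-th smallest (0-based) via three-way partition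
--         p = lst[0]
--         lo = [v for v in lst if v < p]
--         if k < len(lo):
--             return select(lo, k)
--         ne = len(lo) + sum(1 for v in lst if v == p)
--         if k < ne:
--             return p
--         return select([v for v in lst if v > p], k - ne)
--
--     median = select(products, k)
--     return products.index(median)
-- ===== Notes on version B (the rewrite author's own statement) =====
-- stated objective: alternative
-- what changed: B replaces the full sort of the product list by a recursive three-way quickselect that extracts only the (n-1)//2-th smallest product, then looks up its first index as before.
-- outside the precondition, e.g. on get_median_idx([], []): A raises IndexError, B raises IndexError
import Mathlib
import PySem

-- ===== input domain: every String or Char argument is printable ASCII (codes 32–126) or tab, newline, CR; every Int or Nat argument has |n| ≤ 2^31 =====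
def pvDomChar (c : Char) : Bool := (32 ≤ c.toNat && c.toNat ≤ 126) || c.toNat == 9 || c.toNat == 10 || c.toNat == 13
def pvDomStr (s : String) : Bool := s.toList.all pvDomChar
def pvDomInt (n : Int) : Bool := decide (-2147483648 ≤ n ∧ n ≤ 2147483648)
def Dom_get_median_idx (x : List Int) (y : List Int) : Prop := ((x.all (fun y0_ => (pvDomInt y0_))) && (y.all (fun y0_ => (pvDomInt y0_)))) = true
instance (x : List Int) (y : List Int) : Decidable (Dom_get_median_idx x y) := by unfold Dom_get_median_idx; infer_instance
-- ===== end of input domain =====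

-- B replaces A's full sort of the product list by a recursive three-way quickselect for the (n-1)//2-th smallest product (alternative algorithm); the index-lookup tail is unchanged.


-- ===== PORT A =====
def get_median_idx (x : List Int) (y : List Int) : Int :=
  let products := (x.zip y).map (fun p => p.1 * p.2)
  let sorted_values := PySem.List.sorted products (fun v => v) false
  let n : Int := products.length
  let median :=
    if PySem.Int.mod n 2 = 1 then
      (PySem.List.pyGet? sorted_values (PySem.Int.floordiv n 2)).getD 0    -- getD 0: IndexError there is excluded by Pre_
    else
      (PySem.List.pyGet? sorted_values (PySem.Int.floordiv n 2 - 1)).getD 0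
  ((PySem.List.index? products median).map (fun i => (i : Int))).getD 0    -- getD 0: ValueError unreachable (median ∈ products)

-- ===== PORT B =====
-- termination measure for the quickselect recursion (cited by decreasing_by)
theorem pvFilter_cons_lt_length {p : Int} {t : List Int} {f : Int → Bool} (hf : f p = false) :
    ((p :: t).filter f).length < (p :: t).length := by
  simp only [List.filter_cons, hf]
  exact Nat.lt_succ_of_le (List.length_filter_le f t)

def pySelect (lst : List Int) (k : Int) : Int :=
  match lst with
  | [] => 0          -- unreachable for 0 ≤ k < len(lst); the Python would raise IndexError here
  | p :: t =>
    let lo := (p :: t).filter (fun v => decide (v < p))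
    if k < (lo.length : Int) then pySelect lo k
    else
      let ne : Int := lo.length + ((p :: t).filter (fun v => decide (v = p))).length
      if k < ne then p
      else pySelect ((p :: t).filter (fun v => decide (p < v))) (k - ne)
termination_by lst.length
decreasing_by
  · exact pvFilter_cons_lt_length (by simp)
  · exact pvFilter_cons_lt_length (by simp)

def get_median_idx_alt (x : List Int) (y : List Int) : Int :=
  let products := (x.zip y).map (fun p => p.1 * p.2)
  let k : Int := PySem.Int.floordiv ((products.length : Int) - 1) 2
  let median := pySelect products k
  ((PySem.List.index? products median).map (fun i => (i : Int))).getD 0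

-- ===== PRECONDITION & SPEC =====
-- Pre_ excludes exactly the inputs with no pairs to zip (x or y empty): there both A and B raise IndexError.
def Pre_get_median_idx (x : List Int) (y : List Int) : Prop := x ≠ [] ∧ y ≠ []
instance (x : List Int) (y : List Int) : Decidable (Pre_get_median_idx x y) := by unfold Pre_get_median_idx; infer_instance
def pvWitness_get_median_idx : List Int × List Int := ([3, 1, 2], [1, 1, 1])

def Spec_get_median_idx (x : List Int) (y : List Int) (out : Int) : Prop := out = get_median_idx_alt x y
instance (x : List Int) (y : List Int) (out : Int) : Decidable (Spec_get_median_idx x y out) := by unfold Spec_get_median_idx; infer_instance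

-- ===== CLAIM (what is proved, stated in full; the proofs are below) =====
def Claim_equal_get_median_idx : Prop := ∀ (x : List Int) (y : List Int), Dom_get_median_idx x y → Pre_get_median_idx x y → Spec_get_median_idx x y (get_median_idx x y)

-- ===== LEMMAS AND PROOFS =====

-- the three-way partition of a list around a pivot is a permutation of the list
theorem pvPartitionPerm (l : List Int) (p : Int) :
    (l.filter (fun v => decide (v < p)) ++ (l.filter (fun v => decide (v = p)) ++ l.filter (fun v => decide (p < v)))).Perm l := by
  induction l with
  | nil => simp
  | cons a t ih =>
    rcases lt_trichotomy a p with h | h | h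
    · simpa [List.filter_cons, h, not_lt_of_gt h, ne_of_lt h] using ih.cons a
    · subst h
      simp only [List.filter_cons, lt_irrefl, decide_true, decide_false, if_true]
      exact (List.perm_middle).trans (ih.cons a)
    · simp only [List.filter_cons, decide_eq_true_eq, if_neg (not_lt_of_gt h), if_neg (ne_of_gt h),
        if_pos h]
      exact ((List.Perm.append_left _ (List.perm_middle)).trans (List.perm_middle.trans (ih.cons a)))

-- sorted lo ++ eq ++ sorted hi is nondecreasing
theorem pvYsPairwise (l : List Int) (p : Int) :
    List.Pairwise (fun a b => a ≤ b)
      (PySem.List.sorted (l.filter (fun v => decide (v < p))) (fun v => v) false ++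
        (l.filter (fun v => decide (v = p)) ++
          PySem.List.sorted (l.filter (fun v => decide (p < v))) (fun v => v) false)) := by
  rw [List.pairwise_append]
  refine ⟨PySem.List.sorted_pairwise _ _, ?_, ?_⟩
  · rw [List.pairwise_append]
    refine ⟨?_, PySem.List.sorted_pairwise _ _, ?_⟩
    · refine List.pairwise_of_forall_mem_list ?_
      intro a ha b hb
      simp only [List.mem_filter, decide_eq_true_eq] at ha hb
      omega
    · intro a ha b hb
      simp only [List.mem_filter, decide_eq_true_eq] at ha
      rw [PySem.List.mem_sorted] at hb
      simp only [List.mem_filter, decide_eq_true_eq] at hb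
      omega
  · intro a ha b hb
    rw [PySem.List.mem_sorted] at ha
    simp only [List.mem_filter, decide_eq_true_eq] at ha
    rcases List.mem_append.mp hb with hb | hb
    · simp only [List.mem_filter, decide_eq_true_eq] at hb; omega
    · rw [PySem.List.mem_sorted] at hb
      simp only [List.mem_filter, decide_eq_true_eq] at hb; omega

-- sorting commutes with the pivot partition
theorem pvSortedDecomp (p : Int) (t : List Int) :
    PySem.List.sorted (p :: t) (fun v => v) false =
      PySem.List.sorted ((p :: t).filter (fun v => decide (v < p))) (fun v => v) false ++
        ((p :: t).filter (fun v => decide (v = p)) ++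
          PySem.List.sorted ((p :: t).filter (fun v => decide (p < v))) (fun v => v) false) := by
  refine PySem.List.eq_of_perm_of_pairwise_le_of_injective (fun v => v) (fun a b h => h) ?_
    (PySem.List.sorted_pairwise _ _) (pvYsPairwise _ _)
  refine (PySem.List.sorted_perm _ _ _).trans ((pvPartitionPerm (p :: t) p).symm.trans ?_)
  exact ((PySem.List.sorted_perm _ _ _).symm.append
    ((List.Perm.refl _).append (PySem.List.sorted_perm _ _ _).symm))

-- quickselect correctness: pySelect lst k is the k-th element of the sorted list
theorem pvSelect_sorted : ∀ (n : Nat) (lst : List Int), lst.length ≤ n → ∀ (k : Nat), (hk : k < lst.length) →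
    pySelect lst (k : Int) = (PySem.List.sorted lst (fun v => v) false)[k]'(by
      rw [PySem.List.length_sorted]; exact hk) := by
  intro n
  induction n with
  | zero => intro lst h k hk; omega
  | succ n ih =>
    intro lst hlen k hk
    match lst with
    | [] => simp at hk
    | p :: t =>
      have hperm := pvPartitionPerm (p :: t) p
      have hlensum := hperm.length_eq
      simp only [List.length_append] at hlensum
      have hS1 : (PySem.List.sorted ((p :: t).filter (fun v => decide (v < p))) (fun v => v) false).length
          = ((p :: t).filter (fun v => decide (v < p))).length := PySem.List.length_sorted _ _ _
      have hS3 : (PySem.List.sorted ((p :: t).filter (fun v => decide (p < v))) (fun v => v) false).length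
          = ((p :: t).filter (fun v => decide (p < v))).length := PySem.List.length_sorted _ _ _
      have hlt1 : ((p :: t).filter (fun v => decide (v < p))).length < (p :: t).length :=
        pvFilter_cons_lt_length (by simp)
      have hlt3 : ((p :: t).filter (fun v => decide (p < v))).length < (p :: t).length :=
        pvFilter_cons_lt_length (by simp)
      rw [pySelect]
      simp only [pvSortedDecomp p t]
      split_ifs with h1 h2
      · have h1' : k < ((p :: t).filter (fun v => decide (v < p))).length := by exact_mod_cast h1
        rw [List.getElem_append_left (by omega)]
        exact ih _ (by omega) k h1'
      · have h1' : ¬ k < ((p :: t).filter (fun v => decide (v < p))).length := by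
          intro hc; exact h1 (by exact_mod_cast hc)
        have h2' : k < ((p :: t).filter (fun v => decide (v < p))).length
            + ((p :: t).filter (fun v => decide (v = p))).length := by exact_mod_cast h2
        rw [List.getElem_append_right (by omega), List.getElem_append_left (by omega)]
        have hm : ∀ (j : Nat) (hj : j < ((p :: t).filter (fun v => decide (v = p))).length),
            ((p :: t).filter (fun v => decide (v = p)))[j]'hj = p := by
          intro j hj
          have := List.mem_filter.mp (List.getElem_mem hj)
          simpa using this.2
        exact (hm _ _).symm
      · have h1' : ¬ k < ((p :: t).filter (fun v => decide (v < p))).length := by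
          intro hc; exact h1 (by exact_mod_cast hc)
        have h2' : ¬ k < ((p :: t).filter (fun v => decide (v < p))).length
            + ((p :: t).filter (fun v => decide (v = p))).length := by
          intro hc; exact h2 (by omega)
        rw [List.getElem_append_right (by omega), List.getElem_append_right (by omega)]
        have hcast : (k : Int) - (((p :: t).filter (fun v => decide (v < p))).length
            + ((p :: t).filter (fun v => decide (v = p))).length)
            = ((k - ((p :: t).filter (fun v => decide (v < p))).length
              - ((p :: t).filter (fun v => decide (v = p))).length : Nat) : Int) := by
          omega
        rw [hcast]
        have hk3 : k - ((p :: t).filter (fun v => decide (v < p))).length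
            - ((p :: t).filter (fun v => decide (v = p))).length
            < ((p :: t).filter (fun v => decide (p < v))).length := by
          omega
        rw [ih _ (by omega) _ hk3]
        congr 1
        omega

theorem pvPyGet_natCast {xs : List Int} {j : Nat} (hj : j < xs.length) :
    PySem.List.pyGet? xs (j : Int) = some (xs[j]'hj) := by
  simp [PySem.List.pyGet?, PySem.List.pyIdx?, hj]

-- A's parity-split median equals B's quickselected (n-1)//2-th smallest
theorem pvMedians_eq (P : List Int) (hne : P ≠ []) :
    (if PySem.Int.mod (P.length : Int) 2 = 1 then
      (PySem.List.pyGet? (PySem.List.sorted P (fun v => v) false) (PySem.Int.floordiv (P.length : Int) 2)).getD 0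
    else
      (PySem.List.pyGet? (PySem.List.sorted P (fun v => v) false) (PySem.Int.floordiv (P.length : Int) 2 - 1)).getD 0)
    = pySelect P (PySem.Int.floordiv ((P.length : Int) - 1) 2) := by
  have hnn : 1 ≤ P.length := List.length_pos_iff.mpr hne
  have hmod : PySem.Int.mod (P.length : Int) 2 = ((P.length % 2 : Nat) : Int) := by
    exact_mod_cast PySem.Int.mod_natCast P.length 2
  have hdiv : PySem.Int.floordiv (P.length : Int) 2 = ((P.length / 2 : Nat) : Int) := by
    exact_mod_cast PySem.Int.floordiv_natCast P.length 2
  have hkB : PySem.Int.floordiv ((P.length : Int) - 1) 2 = (((P.length - 1) / 2 : Nat) : Int) := by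
    have h1 : ((P.length : Int) - 1) = (((P.length - 1 : Nat)) : Int) := by omega
    rw [h1]
    exact_mod_cast PySem.Int.floordiv_natCast (P.length - 1) 2
  have hkP : (P.length - 1) / 2 < P.length := by omega
  have hsel := pvSelect_sorted P.length P (le_refl _) ((P.length - 1) / 2) hkP
  rw [hkB, hsel, hmod, hdiv]
  by_cases hpar : P.length % 2 = 1
  · rw [if_pos (by exact_mod_cast hpar)]
    have hidx : P.length / 2 < (PySem.List.sorted P (fun v => v) false).length := by
      rw [PySem.List.length_sorted]; omega
    rw [pvPyGet_natCast hidx, Option.getD_some]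
    congr 1
    omega
  · rw [if_neg (by intro hc; exact hpar (by exact_mod_cast hc))]
    have h2 : P.length % 2 = 0 := by omega
    have hge2 : 2 ≤ P.length := by omega
    have hc2 : ((P.length / 2 : Nat) : Int) - 1 = ((P.length / 2 - 1 : Nat) : Int) := by
      have : 1 ≤ P.length / 2 := by omega
      omega
    rw [hc2]
    have hidx : P.length / 2 - 1 < (PySem.List.sorted P (fun v => v) false).length := by
      rw [PySem.List.length_sorted]; omega
    rw [pvPyGet_natCast hidx, Option.getD_some]
    congr 1
    omega

-- ===== VERDICT (by name: the statement is the Claim_ definition above) =====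
theorem get_median_idx_spec : Claim_equal_get_median_idx := by
  intro x y _ hpre
  obtain ⟨hx, hy⟩ := hpre
  have hne : (x.zip y).map (fun p => p.1 * p.2) ≠ [] := by
    match x, y with
    | [], _ => exact absurd rfl hx
    | _ :: _, [] => exact absurd rfl hy
    | a :: xs, b :: ys => simp [List.zip]
  unfold Spec_get_median_idx
  simp only [get_median_idx, get_median_idx_alt]
  rw [pvMedians_eq _ hne]
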